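-- pv_equiv track=rewrite | github.com/nkossally/leet_code | Python/3592. Inverse Coin Change.py | findCoins_slower
-- ===== SOURCE A (Python) =====
-- from typing import List
--
-- def findCoins_slower(numWays: List[int]) -> List[int]:
--     denominations = []
--
--     def get_count(num, denominations):
--         def helper(curr_sum, idx):
--             if curr_sum == num:
--                 return 1
--             if idx == len(denominations):
--                 return 0
--             max_factor = floor((num - curr_sum)/denominations[idx])
--             total = 0
--             for i in range(max_factor + 1):
--                 total += helper(curr_sum + i * denominations[idx], idx + 1)
--             return total
--         return helper(0, 0)
--
--
--     for i in range(len(numWays)):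
--         denomination = i + 1
--         count = get_count(denomination, denominations)
--         if count + 1 == numWays[i]:
--             denominations.append(denomination)
--         elif count != numWays[i]:
--             return []
--     return denominations
-- ===== SOURCE B (Python) =====
-- from typing import List
--
-- def findCoins_slower(numWays: List[int]) -> List[int]:
--     n = len(numWays)
--     ways = [1] + [0] * n          # ways[a] = #multisets of accepted coins summing to a
--     coins = []
--     for amount in range(1, n + 1):
--         w = numWays[amount - 1]
--         cur = ways[amount]
--         if cur == w:
--             continue
--         if cur + 1 != w:
--             return []
--         coins.append(amount)
--         for x in range(amount, n + 1):
--             ways[x] += ways[x - amount]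
--     return coins
-- ===== Notes on version B (the rewrite author's own statement) =====
-- stated objective: alternative
-- what changed: Replaced A's per-amount exponential recursive enumeration of coin combinations with the standard incremental unbounded coin-change DP that maintains a ways[] table updated once per accepted coin.
-- crash fix: A raises NameError ('floor' is used but never imported) on every input whose first nonzero entry equals 1 and is not the last entry, i.e. whenever a coin is accepted before the last amount; B returns the coin denominations reconstructed by the DP there. — e.g. on findCoins_slower([1, 2]): A raises NameError, B returns [1, 2]
import Mathlib
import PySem

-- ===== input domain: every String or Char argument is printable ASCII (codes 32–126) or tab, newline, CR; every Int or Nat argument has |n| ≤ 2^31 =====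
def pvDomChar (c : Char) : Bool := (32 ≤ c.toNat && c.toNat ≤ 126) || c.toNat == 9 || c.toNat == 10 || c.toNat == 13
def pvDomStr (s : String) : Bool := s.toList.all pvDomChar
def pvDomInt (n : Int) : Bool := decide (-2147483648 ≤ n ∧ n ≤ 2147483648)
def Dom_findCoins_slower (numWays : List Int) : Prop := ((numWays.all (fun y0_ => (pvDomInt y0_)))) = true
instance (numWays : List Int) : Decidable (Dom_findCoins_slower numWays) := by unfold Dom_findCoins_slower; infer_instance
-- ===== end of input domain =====

-- B replaces A's per-amount exponential recursive enumeration with the standard incremental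
-- unbounded-coin-change DP table (objective: alternative; A only ever returns before its broken
-- recursion is reached, so no speed claim). Pre_ excludes exactly the inputs where A raises
-- NameError ('floor' is never imported), on which B returns the intended DP answer.


-- ===== PORT A =====
-- helper(curr_sum, idx): iteration of idx over `denominations` is transcribed as structural
-- recursion on the suffix `rest = denominations[idx:]`; `floor((num-curr_sum)/d)` is exact
-- floor division on ints, ported as PySem.Int.floordiv (in Python this line would actually
-- raise NameError — `floor` is not imported — which is exactly what Pre_ excludes below).
def pvHelper (num currSum : Int) (rest : List Int) : Int :=
  if currSum == num then 1
  else
    match rest with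
    | [] => 0
    | d :: rest' =>
      (PySem.List.pyRange 0 (PySem.Int.floordiv (num - currSum) d + 1) 1).foldl
        (fun total i => total + pvHelper num (currSum + i * d) rest') 0
termination_by rest.length
decreasing_by simp

-- the main `for i in range(len(numWays))` loop; indices are in range, so getD is exact
def pvALoop (numWays : List Int) (dens : List Int) (i : Nat) : List Int :=
  if _h : i < numWays.length then
    let denomination : Int := (i : Int) + 1
    let count := pvHelper denomination 0 dens
    if count + 1 == numWays.getD i 0 then pvALoop numWays (dens ++ [denomination]) (i + 1)
    else if count != numWays.getD i 0 then []
    else pvALoop numWays dens (i + 1)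
  else dens
termination_by numWays.length - i

def findCoins_slower (numWays : List Int) : List Int :=
  pvALoop numWays [] 0

-- ===== PORT B =====
-- inner `for x in range(amount, n+1): ways[x] += ways[x-amount]`; all indices in range, getD/set exact
def pvBUpd (n amount : Nat) (ways : List Int) : List Int :=
  (List.range' amount (n + 1 - amount)).foldl
    (fun w x => w.set x (w.getD x 0 + w.getD (x - amount) 0)) ways

-- `for amount in range(1, n+1)` loop of Source B
def pvBLoop (numWays : List Int) (n : Nat) (ways coins : List Int) (amount : Nat) : List Int :=
  if _h : amount ≤ n then
    let w := numWays.getD (amount - 1) 0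
    let cur := ways.getD amount 0
    if cur == w then pvBLoop numWays n ways coins (amount + 1)
    else if cur + 1 != w then []
    else pvBLoop numWays n (pvBUpd n amount ways) (coins ++ [(amount : Int)]) (amount + 1)
  else coins
termination_by n + 1 - amount

def findCoins_slower_alt (numWays : List Int) : List Int :=
  pvBLoop numWays numWays.length (1 :: List.replicate numWays.length 0) [] 1

-- ===== PRECONDITION & SPEC =====
-- Pre_ excludes exactly the inputs on which Python A RAISES NameError (`floor` is not imported):
-- those where the first nonzero entry equals 1 and is not the last entry, so a coin is accepted
-- and a later iteration reaches the `floor` line. A never returns a value on these inputs.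
def Pre_findCoins_slower (numWays : List Int) : Prop :=
  ∀ k, k < numWays.length - 1 → (∀ j, j < k → numWays.getD j 0 = 0) → numWays.getD k 0 ≠ 1
instance (numWays : List Int) : Decidable (Pre_findCoins_slower numWays) := by
  unfold Pre_findCoins_slower; infer_instance

def pvWitness_findCoins_slower : List Int := [0, 1]

-- A raises NameError (the first nonzero entry is 1 and not last, so `floor` — never imported —
-- is reached); B returns the denominations reconstructed by the DP.
def Raises_findCoins_slower (numWays : List Int) : Prop :=
  ∃ k, k < numWays.length - 1 ∧ (∀ j, j < k → numWays.getD j 0 = 0) ∧ numWays.getD k 0 = 1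
instance (numWays : List Int) : Decidable (Raises_findCoins_slower numWays) := by
  unfold Raises_findCoins_slower; infer_instance

def pvRaiseWitness_findCoins_slower : List Int := [1, 2]
def pvRaiseWitnessOut_findCoins_slower : List Int := [1, 2]

def Spec_findCoins_slower (numWays : List Int) (out : List Int) : Prop :=
  out = findCoins_slower_alt numWays
instance (numWays : List Int) (out : List Int) : Decidable (Spec_findCoins_slower numWays out) := by
  unfold Spec_findCoins_slower; infer_instance

-- ===== CLAIM (what is proved, stated in full; the proofs are below) =====
def Claim_equal_findCoins_slower : Prop := ∀ (numWays : List Int), Dom_findCoins_slower numWays → Pre_findCoins_slower numWays → Spec_findCoins_slower numWays (findCoins_slower numWays)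

def Claim_raises_findCoins_slower : Prop := (∀ (numWays : List Int), Dom_findCoins_slower numWays → Raises_findCoins_slower numWays → ¬ Pre_findCoins_slower numWays) ∧ (Dom_findCoins_slower (pvRaiseWitness_findCoins_slower) ∧ Raises_findCoins_slower (pvRaiseWitness_findCoins_slower) ∧ findCoins_slower_alt (pvRaiseWitness_findCoins_slower) = pvRaiseWitnessOut_findCoins_slower)

-- ===== LEMMAS AND PROOFS =====

lemma pvHelper_nil (num : Int) (h : num ≠ 0) : pvHelper num 0 [] = 0 := by
  rw [pvHelper]
  simp [h.symm]

lemma loops_agree (numWays : List Int) (hpre : Pre_findCoins_slower numWays) :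
    ∀ d i, numWays.length - i = d → i ≤ numWays.length →
      (∀ j, j < i → numWays.getD j 0 = 0) →
      pvALoop numWays [] i
        = pvBLoop numWays numWays.length (1 :: List.replicate numWays.length 0) [] (i + 1) := by
  intro d
  induction d with
  | zero =>
    intro i hd hle _
    have hi : i = numWays.length := by omega
    rw [pvALoop, pvBLoop]
    simp [hi]
  | succ d ih =>
    intro i hd hle hzero
    have hi : i < numWays.length := by omega
    have hcount : pvHelper ((i : Int) + 1) 0 [] = 0 := pvHelper_nil _ (by omega)
    rw [pvALoop, pvBLoop]
    have hA : (i + 1 ≤ numWays.length) := hi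
    simp only [dif_pos hi, dif_pos hA, hcount]
    have hidx : i + 1 - 1 = i := by omega
    have hcur : ((1 : Int) :: List.replicate numWays.length 0).getD (i + 1) 0 = 0 := by
      simp
    rw [hidx, hcur]
    by_cases h0 : numWays.getD i 0 = 0
    · -- entry 0: both loops continue unchanged
      simp only [h0]
      norm_num
      exact ih (i + 1) (by omega) (by omega)
        (by intro j hj; rcases Nat.lt_succ_iff_lt_or_eq.mp hj with h | h
            · exact hzero j h
            · simpa [h] using h0)
    · by_cases h1 : numWays.getD i 0 = 1
      · -- entry 1: a coin is accepted; Pre_ forces this to be the last index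
        have hlast : i + 1 = numWays.length := by
          by_contra hne
          have : i < numWays.length - 1 := by omega
          exact hpre i this hzero h1
        simp only [h1]
        norm_num
        rw [pvALoop, pvBLoop]
        have h2 : ¬ (i + 1 < numWays.length) := by omega
        have h3 : ¬ (i + 1 + 1 ≤ numWays.length) := by omega
        simp only [dif_neg h2, dif_neg h3]
      · -- other entry: both return []
        simp only [beq_iff_eq, bne_iff_ne]
        rw [if_neg (by omega : ¬ ((0 : Int) + 1 = numWays.getD i 0)),
            if_pos (by omega : (0 : Int) ≠ numWays.getD i 0),
            if_neg (by omega : ¬ ((0 : Int) = numWays.getD i 0)),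
            if_pos (by omega : (0 : Int) + 1 ≠ numWays.getD i 0)]

-- ===== VERDICT (by name: the statement is the Claim_ definition above) =====
theorem findCoins_slower_spec : Claim_equal_findCoins_slower := by
  intro numWays _ hpre
  unfold Spec_findCoins_slower findCoins_slower findCoins_slower_alt
  exact loops_agree numWays hpre numWays.length 0 (by omega) (by omega) (by omega)

@[simp] theorem findCoins_slower_raises : Claim_raises_findCoins_slower := by
  unfold Claim_raises_findCoins_slower
  constructor
  · intro numWays _ ⟨k, hk, hz, h1⟩ hpre
    exact hpre k hk hz h1
  · refine ⟨by decide, ⟨0, by decide, by intro j hj; omega, by decide⟩, ?_⟩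
    unfold findCoins_slower_alt pvRaiseWitness_findCoins_slower pvRaiseWitnessOut_findCoins_slower
    rw [pvBLoop]; norm_num [pvBUpd, List.range']
    rw [pvBLoop]; norm_num [pvBUpd, List.range']
    rw [pvBLoop]; norm_num
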